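-- pv_equiv track=rewrite | github.com/IT-Step-Group-SPR421-2026/Project-Team-3 | backend/habits/api/views.py | get_rank_for_xp
-- ===== SOURCE A (Python) =====
-- def get_rank_for_xp(xp_total: int):
--     """Return (rank_name, xp_to_next_rank) for a given total XP.
--
--     xp_to_next_rank is the additional XP required to reach the next rank.
--     If already at the highest rank, xp_to_next_rank will be 0.
--     """
--     # thresholds: (min_xp, name)
--     thresholds = [
--         (0, "Seedling"),
--         (100, "Sprout"),
--         (250, "Routine"),
--         (500, "Steady"),
--         (800, "Ritual"),
--         (1200, "Disciplined"),
--         (1700, "Resilient"),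
--         (2300, "Consistent"),
--         (3000, "Focused"),
--         (4000, "Mastery"),
--     ]
--
--     # find current rank (largest min_xp <= xp_total)
--     current = thresholds[0]
--     for t in thresholds:
--         if xp_total >= t[0]:
--             current = t
--         else:
--             break
--
--     # find next threshold
--     next_threshold = None
--     for t in thresholds:
--         if t[0] > current[0]:
--             next_threshold = t
--             break
--
--     if next_threshold is None:
--         xp_to_next = 0
--     else:
--         xp_to_next = max(0, next_threshold[0] - xp_total)
--
--     return current[1], xp_to_next
-- ===== SOURCE B (Python) =====
-- MINS = [0, 100, 250, 500, 800, 1200, 1700, 2300, 3000, 4000]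
-- NAMES = ["Seedling", "Sprout", "Routine", "Steady", "Ritual",
--          "Disciplined", "Resilient", "Consistent", "Focused", "Mastery"]
--
--
-- def get_rank_for_xp(xp_total: int):
--     """Return (rank_name, xp_to_next_rank) via binary search over MINS."""
--     # hand-written bisect_right over the sorted threshold mins
--     lo, hi = 0, len(MINS)
--     while lo < hi:
--         mid = (lo + hi) // 2
--         if xp_total < MINS[mid]:
--             hi = mid
--         else:
--             lo = mid + 1
--     idx = max(0, lo - 1)
--     if idx == len(MINS) - 1:
--         xp_to_next = 0
--     else:
--         xp_to_next = max(0, MINS[idx + 1] - xp_total)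
--     return NAMES[idx], xp_to_next
-- ===== Notes on version B (the rewrite author's own statement) =====
-- stated objective: alternative
-- what changed: Replaced A's two linear scans over the threshold table (one with break to find the current rank, one to find the next threshold) by a single hand-written bisect_right binary search over the sorted min_xp list, clamping the insertion index at the bottom rank and reading the next-rank XP directly at the following index.
import Mathlib
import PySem

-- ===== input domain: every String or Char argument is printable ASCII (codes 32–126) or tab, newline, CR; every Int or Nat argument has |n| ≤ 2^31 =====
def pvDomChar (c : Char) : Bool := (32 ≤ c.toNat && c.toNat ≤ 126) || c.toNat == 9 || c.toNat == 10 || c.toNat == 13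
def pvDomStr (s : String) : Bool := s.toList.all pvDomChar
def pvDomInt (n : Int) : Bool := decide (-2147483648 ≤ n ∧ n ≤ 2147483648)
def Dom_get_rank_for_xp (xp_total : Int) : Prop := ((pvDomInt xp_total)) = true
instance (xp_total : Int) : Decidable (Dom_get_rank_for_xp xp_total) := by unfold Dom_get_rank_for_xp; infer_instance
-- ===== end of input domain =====

-- B replaces A's two linear scans of the threshold table by one binary search (bisect_right)
-- over the min_xp list; equivalence of return values proved for all Int inputs in Dom.

-- ===== PORT A =====
def thresholdsA : List (Int × String) :=
  [(0, "Seedling"), (100, "Sprout"), (250, "Routine"), (500, "Steady"), (800, "Ritual"),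
   (1200, "Disciplined"), (1700, "Resilient"), (2300, "Consistent"), (3000, "Focused"),
   (4000, "Mastery")]

-- first loop: 'for t in thresholds: if xp >= t[0]: current = t else: break'
def loopCurA (xp : Int) : List (Int × String) → (Int × String) → (Int × String)
  | [], cur => cur
  | t :: rest, cur => if xp ≥ t.1 then loopCurA xp rest t else cur

-- second loop: 'for t in thresholds: if t[0] > current[0]: next_threshold = t; break'
def loopNextA (c : Int) : List (Int × String) → Option (Int × String)
  | [] => none
  | t :: rest => if t.1 > c then some t else loopNextA c rest

def get_rank_for_xp (xp_total : Int) : String × Int :=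
  let current := loopCurA xp_total thresholdsA (0, "Seedling")
  match loopNextA current.1 thresholdsA with
  | none => (current.2, 0)
  | some nt => (current.2, max 0 (nt.1 - xp_total))

-- ===== PORT B =====
def minsB : List Int := [0, 100, 250, 500, 800, 1200, 1700, 2300, 3000, 4000]
def namesB : List String :=
  ["Seedling", "Sprout", "Routine", "Steady", "Ritual",
   "Disciplined", "Resilient", "Consistent", "Focused", "Mastery"]

-- the 'while lo < hi' bisect_right loop; lo, hi are list indices, kept as Nat.
-- fuel only bounds the iteration count to make the recursion structural: the loop
-- shrinks hi - lo by at least 1 each step, so fuel = initial hi - lo = 10 is never exhausted.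
def bsrB (xp : Int) : Nat → Nat → Nat → Nat
  | 0, lo, _ => lo
  | fuel + 1, lo, hi =>
    if lo < hi then
      let mid := (lo + hi) / 2
      if xp < minsB.getD mid 0 then bsrB xp fuel lo mid else bsrB xp fuel (mid + 1) hi
    else lo

def get_rank_for_xp_alt (xp_total : Int) : String × Int :=
  let pos := bsrB xp_total minsB.length 0 minsB.length
  let idx := max 0 (pos - 1)
  let xp_to_next : Int :=
    if idx = minsB.length - 1 then 0 else max 0 (minsB.getD (idx + 1) 0 - xp_total)
  (namesB.getD idx "", xp_to_next)

-- ===== PRECONDITION & SPEC =====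
def Spec_get_rank_for_xp (xp_total : Int) (out : String × Int) : Prop := out = get_rank_for_xp_alt xp_total
instance (xp_total : Int) (out : String × Int) : Decidable (Spec_get_rank_for_xp xp_total out) := by unfold Spec_get_rank_for_xp; infer_instance

-- ===== CLAIM (what is proved, stated in full; the proofs are below) =====
def Claim_equal_get_rank_for_xp : Prop := ∀ (xp_total : Int), Dom_get_rank_for_xp xp_total → Spec_get_rank_for_xp xp_total (get_rank_for_xp xp_total)

-- ===== LEMMAS AND PROOFS =====

-- ===== VERDICT (by name: the statement is the Claim_ definition above) =====
theorem get_rank_for_xp_spec : Claim_equal_get_rank_for_xp := by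
  intro xp _
  unfold Spec_get_rank_for_xp get_rank_for_xp get_rank_for_xp_alt
  rcases Int.lt_or_le xp 0 with h0|h0
  · simp [thresholdsA, minsB, namesB, loopCurA, loopNextA, bsrB,
      show ¬ (0:Int) ≤ xp by omega,
      show xp < (0:Int) by omega,
      show ¬ (100:Int) ≤ xp by omega,
      show xp < (100:Int) by omega,
      show ¬ (250:Int) ≤ xp by omega,
      show xp < (250:Int) by omega,
      show ¬ (500:Int) ≤ xp by omega,
      show xp < (500:Int) by omega,
      show ¬ (800:Int) ≤ xp by omega,
      show xp < (800:Int) by omega,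
      show ¬ (1200:Int) ≤ xp by omega,
      show xp < (1200:Int) by omega,
      show ¬ (1700:Int) ≤ xp by omega,
      show xp < (1700:Int) by omega,
      show ¬ (2300:Int) ≤ xp by omega,
      show xp < (2300:Int) by omega,
      show ¬ (3000:Int) ≤ xp by omega,
      show xp < (3000:Int) by omega,
      show ¬ (4000:Int) ≤ xp by omega,
      show xp < (4000:Int) by omega]
  rcases Int.lt_or_le xp 100 with h1|h1
  · simp [thresholdsA, minsB, namesB, loopCurA, loopNextA, bsrB,
      show (0:Int) ≤ xp by omega,
      show ¬ xp < (0:Int) by omega,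
      show ¬ (100:Int) ≤ xp by omega,
      show xp < (100:Int) by omega,
      show ¬ (250:Int) ≤ xp by omega,
      show xp < (250:Int) by omega,
      show ¬ (500:Int) ≤ xp by omega,
      show xp < (500:Int) by omega,
      show ¬ (800:Int) ≤ xp by omega,
      show xp < (800:Int) by omega,
      show ¬ (1200:Int) ≤ xp by omega,
      show xp < (1200:Int) by omega,
      show ¬ (1700:Int) ≤ xp by omega,
      show xp < (1700:Int) by omega,
      show ¬ (2300:Int) ≤ xp by omega,
      show xp < (2300:Int) by omega,
      show ¬ (3000:Int) ≤ xp by omega,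
      show xp < (3000:Int) by omega,
      show ¬ (4000:Int) ≤ xp by omega,
      show xp < (4000:Int) by omega]
  rcases Int.lt_or_le xp 250 with h2|h2
  · simp [thresholdsA, minsB, namesB, loopCurA, loopNextA, bsrB,
      show (0:Int) ≤ xp by omega,
      show ¬ xp < (0:Int) by omega,
      show (100:Int) ≤ xp by omega,
      show ¬ xp < (100:Int) by omega,
      show ¬ (250:Int) ≤ xp by omega,
      show xp < (250:Int) by omega,
      show ¬ (500:Int) ≤ xp by omega,
      show xp < (500:Int) by omega,
      show ¬ (800:Int) ≤ xp by omega,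
      show xp < (800:Int) by omega,
      show ¬ (1200:Int) ≤ xp by omega,
      show xp < (1200:Int) by omega,
      show ¬ (1700:Int) ≤ xp by omega,
      show xp < (1700:Int) by omega,
      show ¬ (2300:Int) ≤ xp by omega,
      show xp < (2300:Int) by omega,
      show ¬ (3000:Int) ≤ xp by omega,
      show xp < (3000:Int) by omega,
      show ¬ (4000:Int) ≤ xp by omega,
      show xp < (4000:Int) by omega]
  rcases Int.lt_or_le xp 500 with h3|h3
  · simp [thresholdsA, minsB, namesB, loopCurA, loopNextA, bsrB,
      show (0:Int) ≤ xp by omega,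
      show ¬ xp < (0:Int) by omega,
      show (100:Int) ≤ xp by omega,
      show ¬ xp < (100:Int) by omega,
      show (250:Int) ≤ xp by omega,
      show ¬ xp < (250:Int) by omega,
      show ¬ (500:Int) ≤ xp by omega,
      show xp < (500:Int) by omega,
      show ¬ (800:Int) ≤ xp by omega,
      show xp < (800:Int) by omega,
      show ¬ (1200:Int) ≤ xp by omega,
      show xp < (1200:Int) by omega,
      show ¬ (1700:Int) ≤ xp by omega,
      show xp < (1700:Int) by omega,
      show ¬ (2300:Int) ≤ xp by omega,
      show xp < (2300:Int) by omega,
      show ¬ (3000:Int) ≤ xp by omega,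
      show xp < (3000:Int) by omega,
      show ¬ (4000:Int) ≤ xp by omega,
      show xp < (4000:Int) by omega]
  rcases Int.lt_or_le xp 800 with h4|h4
  · simp [thresholdsA, minsB, namesB, loopCurA, loopNextA, bsrB,
      show (0:Int) ≤ xp by omega,
      show ¬ xp < (0:Int) by omega,
      show (100:Int) ≤ xp by omega,
      show ¬ xp < (100:Int) by omega,
      show (250:Int) ≤ xp by omega,
      show ¬ xp < (250:Int) by omega,
      show (500:Int) ≤ xp by omega,
      show ¬ xp < (500:Int) by omega,
      show ¬ (800:Int) ≤ xp by omega,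
      show xp < (800:Int) by omega,
      show ¬ (1200:Int) ≤ xp by omega,
      show xp < (1200:Int) by omega,
      show ¬ (1700:Int) ≤ xp by omega,
      show xp < (1700:Int) by omega,
      show ¬ (2300:Int) ≤ xp by omega,
      show xp < (2300:Int) by omega,
      show ¬ (3000:Int) ≤ xp by omega,
      show xp < (3000:Int) by omega,
      show ¬ (4000:Int) ≤ xp by omega,
      show xp < (4000:Int) by omega]
  rcases Int.lt_or_le xp 1200 with h5|h5
  · simp [thresholdsA, minsB, namesB, loopCurA, loopNextA, bsrB,
      show (0:Int) ≤ xp by omega,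
      show ¬ xp < (0:Int) by omega,
      show (100:Int) ≤ xp by omega,
      show ¬ xp < (100:Int) by omega,
      show (250:Int) ≤ xp by omega,
      show ¬ xp < (250:Int) by omega,
      show (500:Int) ≤ xp by omega,
      show ¬ xp < (500:Int) by omega,
      show (800:Int) ≤ xp by omega,
      show ¬ xp < (800:Int) by omega,
      show ¬ (1200:Int) ≤ xp by omega,
      show xp < (1200:Int) by omega,
      show ¬ (1700:Int) ≤ xp by omega,
      show xp < (1700:Int) by omega,
      show ¬ (2300:Int) ≤ xp by omega,
      show xp < (2300:Int) by omega,
      show ¬ (3000:Int) ≤ xp by omega,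
      show xp < (3000:Int) by omega,
      show ¬ (4000:Int) ≤ xp by omega,
      show xp < (4000:Int) by omega]
  rcases Int.lt_or_le xp 1700 with h6|h6
  · simp [thresholdsA, minsB, namesB, loopCurA, loopNextA, bsrB,
      show (0:Int) ≤ xp by omega,
      show ¬ xp < (0:Int) by omega,
      show (100:Int) ≤ xp by omega,
      show ¬ xp < (100:Int) by omega,
      show (250:Int) ≤ xp by omega,
      show ¬ xp < (250:Int) by omega,
      show (500:Int) ≤ xp by omega,
      show ¬ xp < (500:Int) by omega,
      show (800:Int) ≤ xp by omega,
      show ¬ xp < (800:Int) by omega,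
      show (1200:Int) ≤ xp by omega,
      show ¬ xp < (1200:Int) by omega,
      show ¬ (1700:Int) ≤ xp by omega,
      show xp < (1700:Int) by omega,
      show ¬ (2300:Int) ≤ xp by omega,
      show xp < (2300:Int) by omega,
      show ¬ (3000:Int) ≤ xp by omega,
      show xp < (3000:Int) by omega,
      show ¬ (4000:Int) ≤ xp by omega,
      show xp < (4000:Int) by omega]
  rcases Int.lt_or_le xp 2300 with h7|h7
  · simp [thresholdsA, minsB, namesB, loopCurA, loopNextA, bsrB,
      show (0:Int) ≤ xp by omega,
      show ¬ xp < (0:Int) by omega,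
      show (100:Int) ≤ xp by omega,
      show ¬ xp < (100:Int) by omega,
      show (250:Int) ≤ xp by omega,
      show ¬ xp < (250:Int) by omega,
      show (500:Int) ≤ xp by omega,
      show ¬ xp < (500:Int) by omega,
      show (800:Int) ≤ xp by omega,
      show ¬ xp < (800:Int) by omega,
      show (1200:Int) ≤ xp by omega,
      show ¬ xp < (1200:Int) by omega,
      show (1700:Int) ≤ xp by omega,
      show ¬ xp < (1700:Int) by omega,
      show ¬ (2300:Int) ≤ xp by omega,
      show xp < (2300:Int) by omega,
      show ¬ (3000:Int) ≤ xp by omega,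
      show xp < (3000:Int) by omega,
      show ¬ (4000:Int) ≤ xp by omega,
      show xp < (4000:Int) by omega]
  rcases Int.lt_or_le xp 3000 with h8|h8
  · simp [thresholdsA, minsB, namesB, loopCurA, loopNextA, bsrB,
      show (0:Int) ≤ xp by omega,
      show ¬ xp < (0:Int) by omega,
      show (100:Int) ≤ xp by omega,
      show ¬ xp < (100:Int) by omega,
      show (250:Int) ≤ xp by omega,
      show ¬ xp < (250:Int) by omega,
      show (500:Int) ≤ xp by omega,
      show ¬ xp < (500:Int) by omega,
      show (800:Int) ≤ xp by omega,
      show ¬ xp < (800:Int) by omega,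
      show (1200:Int) ≤ xp by omega,
      show ¬ xp < (1200:Int) by omega,
      show (1700:Int) ≤ xp by omega,
      show ¬ xp < (1700:Int) by omega,
      show (2300:Int) ≤ xp by omega,
      show ¬ xp < (2300:Int) by omega,
      show ¬ (3000:Int) ≤ xp by omega,
      show xp < (3000:Int) by omega,
      show ¬ (4000:Int) ≤ xp by omega,
      show xp < (4000:Int) by omega]
  rcases Int.lt_or_le xp 4000 with h9|h9
  · simp [thresholdsA, minsB, namesB, loopCurA, loopNextA, bsrB,
      show (0:Int) ≤ xp by omega,
      show ¬ xp < (0:Int) by omega,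
      show (100:Int) ≤ xp by omega,
      show ¬ xp < (100:Int) by omega,
      show (250:Int) ≤ xp by omega,
      show ¬ xp < (250:Int) by omega,
      show (500:Int) ≤ xp by omega,
      show ¬ xp < (500:Int) by omega,
      show (800:Int) ≤ xp by omega,
      show ¬ xp < (800:Int) by omega,
      show (1200:Int) ≤ xp by omega,
      show ¬ xp < (1200:Int) by omega,
      show (1700:Int) ≤ xp by omega,
      show ¬ xp < (1700:Int) by omega,
      show (2300:Int) ≤ xp by omega,
      show ¬ xp < (2300:Int) by omega,
      show (3000:Int) ≤ xp by omega,
      show ¬ xp < (3000:Int) by omega,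
      show ¬ (4000:Int) ≤ xp by omega,
      show xp < (4000:Int) by omega]
  · simp [thresholdsA, minsB, namesB, loopCurA, loopNextA, bsrB,
      show (0:Int) ≤ xp by omega,
      show ¬ xp < (0:Int) by omega,
      show (100:Int) ≤ xp by omega,
      show ¬ xp < (100:Int) by omega,
      show (250:Int) ≤ xp by omega,
      show ¬ xp < (250:Int) by omega,
      show (500:Int) ≤ xp by omega,
      show ¬ xp < (500:Int) by omega,
      show (800:Int) ≤ xp by omega,
      show ¬ xp < (800:Int) by omega,
      show (1200:Int) ≤ xp by omega,
      show ¬ xp < (1200:Int) by omega,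
      show (1700:Int) ≤ xp by omega,
      show ¬ xp < (1700:Int) by omega,
      show (2300:Int) ≤ xp by omega,
      show ¬ xp < (2300:Int) by omega,
      show (3000:Int) ≤ xp by omega,
      show ¬ xp < (3000:Int) by omega,
      show (4000:Int) ≤ xp by omega,
      show ¬ xp < (4000:Int) by omega]
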